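-- pv_equiv track=rewrite | github.com/jerji/wgUI | wgUI.py | randomNames
-- ===== SOURCE A (Python) =====
-- def randomNames(sections):
--     i=0
--     #Increment i and name each user to User(i)
--     for section in sections:
--         if 'Peer' in section and not '#Name' in sections[section]:
--             info = {'#Name': ['User' + str(i)]}
--             sections[section].update(info)
--             i += 1
--     return sections
-- ===== SOURCE B (Python) =====
-- def randomNames(sections):
--     # Counter-free formulation: precompute a snapshot flag vector of which
--     # sections qualify, then give each qualifying section the index equal to
--     # the number of qualifying sections strictly before it (a prefix count),
--     # instead of threading a running counter through the loop.
--     flags = ['Peer' in k and '#Name' not in v for k, v in sections.items()]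
--     for p, k in enumerate(sections):
--         if flags[p]:
--             sections[k]['#Name'] = ['User' + str(sum(flags[:p]))]
--     return sections
-- ===== Notes on version B (the rewrite author's own statement) =====
-- stated objective: alternative
-- what changed: Eliminates A's running counter and its re-check of the mutated dict: B snapshots a boolean qualification vector once, then assigns each qualifying section the prefix count of earlier qualifying flags (sum(flags[:p])) via dict-item assignment; Pre_ requires distinct outer keys, which every Python dict guarantees but the association-list rendering does not.
import Mathlib
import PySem

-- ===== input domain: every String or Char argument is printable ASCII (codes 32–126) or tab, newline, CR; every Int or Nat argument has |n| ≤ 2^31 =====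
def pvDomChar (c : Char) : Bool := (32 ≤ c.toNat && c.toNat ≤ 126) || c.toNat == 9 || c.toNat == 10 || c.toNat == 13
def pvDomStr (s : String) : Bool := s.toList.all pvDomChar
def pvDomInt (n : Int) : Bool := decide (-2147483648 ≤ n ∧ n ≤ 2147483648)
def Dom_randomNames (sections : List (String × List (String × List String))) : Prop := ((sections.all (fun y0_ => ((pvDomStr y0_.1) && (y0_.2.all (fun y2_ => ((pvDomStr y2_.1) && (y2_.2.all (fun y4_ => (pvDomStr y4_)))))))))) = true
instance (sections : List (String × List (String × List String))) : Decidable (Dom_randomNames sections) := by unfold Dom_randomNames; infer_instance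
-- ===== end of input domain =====

-- B drops A's running counter: it snapshots a qualification flag vector once and
-- numbers each qualifying section by the prefix count of earlier qualifying flags
-- (alternative formulation; same in-place mutation, claim is about the return value).

-- ===== PORT A =====
-- sections[section].update({'#Name': v}) / sections[k]['#Name'] = v:
-- single-key update on the inner dict
def pvInsertName (inner : List (String × List String)) (v : List String) :
    List (String × List String) :=
  if inner.any (fun q => q.1 == "#Name") then
    inner.map (fun q => if q.1 == "#Name" then ("#Name", v) else q)
  else inner ++ [("#Name", v)]

-- in-place mutation of sections[key] (first matching entry, as a Python dict lookup)
def pvSetName (d : List (String × List (String × List String))) (key : String)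
    (v : List String) : List (String × List (String × List String)) :=
  match d with
  | [] => []
  | p :: rest =>
    if p.1 == key then (p.1, pvInsertName p.2 v) :: rest
    else p :: pvSetName rest key v

def randomNames (sections : List (String × List (String × List String))) :
    List (String × List (String × List String)) :=
  ((sections.map Prod.fst).foldl
    (fun (st : List (String × List (String × List String)) × Int) key =>
      if PySem.Str.isIn "Peer" key &&
         !(((st.1.lookup key).getD []).any (fun q => q.1 == "#Name")) then
        (pvSetName st.1 key ["User" ++ PySem.Int.toStr st.2], st.2 + 1)
      else st)
    (sections, 0)).1

-- ===== PORT B =====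
def randomNames_alt (sections : List (String × List (String × List String))) :
    List (String × List (String × List String)) :=
  let flags := sections.map (fun p =>
    PySem.Str.isIn "Peer" p.1 && !(p.2.any (fun q => q.1 == "#Name")))
  (PySem.List.enumerate (sections.map Prod.fst) 0).foldl
    (fun d pk =>
      if PySem.List.pyGetD flags pk.1 false then
        pvSetName d pk.2
          ["User" ++ PySem.Int.toStr
            ((PySem.List.slice flags none (some pk.1)).foldl
              (fun a b => a + (if b then (1 : Int) else 0)) 0)]
      else d)
    sections

-- ===== PRECONDITION & SPEC =====
-- Pre_ requires the outer section keys to be distinct, as they are for every Python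
-- dict; on duplicate-key association lists A's recheck against the mutated dict is accidental.
def Pre_randomNames (sections : List (String × List (String × List String))) : Prop :=
  (sections.map Prod.fst).Nodup

instance (sections : List (String × List (String × List String))) :
    Decidable (Pre_randomNames sections) := by unfold Pre_randomNames; infer_instance

def pvWitness_randomNames : (List (String × List (String × List String))) :=
  [("Peer 1", [("Endpoint", ["e"])]), ("Interface", []), ("Peer 2", [("#Name", ["bob"])])]

def Spec_randomNames (sections : List (String × List (String × List String))) (out : List (String × List (String × List String))) : Prop := out = randomNames_alt sections
instance (sections : List (String × List (String × List String))) (out : List (String × List (String × List String))) : Decidable (Spec_randomNames sections out) := by unfold Spec_randomNames; infer_instance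

-- ===== CLAIM (what is proved, stated in full; the proofs are below) =====
def Claim_equal_randomNames : Prop := ∀ (sections : List (String × List (String × List String))), Dom_randomNames sections → Pre_randomNames sections → Spec_randomNames sections (randomNames sections)

-- ===== LEMMAS AND PROOFS =====

-- A's qualification test, read against a fixed original dict
def pvQual (orig : List (String × List (String × List String))) (k : String) : Bool :=
  PySem.Str.isIn "Peer" k &&
    !(((orig.lookup k).getD []).any (fun q => q.1 == "#Name"))

theorem lookup_pvSetName_ne (d : List (String × List (String × List String)))
    (key k : String) (v : List String) (h : k ≠ key) :
    (pvSetName d key v).lookup k = d.lookup k := by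
  induction d with
  | nil => rfl
  | cons p rest ih =>
    by_cases hp : p.1 = key
    · have hf : (k == key) = false := beq_eq_false_iff_ne.mpr h
      simp [pvSetName, List.lookup, hp, hf]
    · by_cases hk : k = p.1
      · simp [pvSetName, List.lookup, hp, hk]
      · simp [pvSetName, List.lookup, hp, ih]

theorem lookup_self_of_nodup (orig : List (String × List (String × List String)))
    (h : (orig.map Prod.fst).Nodup) :
    ∀ p ∈ orig, orig.lookup p.1 = some p.2 := by
  induction orig with
  | nil => intro p hp; cases hp
  | cons x rest ih =>
    intro p hp
    rcases List.mem_cons.mp hp with rfl | hp'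
    · simp [List.lookup]
    · have hx : x.1 ≠ p.1 := by
        intro e
        have : x.1 ∈ rest.map Prod.fst := e ▸ List.mem_map_of_mem hp'
        exact (List.nodup_cons.mp (by simpa using h)).1 this
      have hf : (p.1 == x.1) = false := beq_eq_false_iff_ne.mpr (fun e => hx e.symm)
      simp only [List.lookup, hf]
      exact ih (by simpa using (List.nodup_cons.mp (by simpa using h)).2) p hp'

-- the flag vector computed from the entries agrees with pvQual on the keys
theorem flags_forall (orig : List (String × List (String × List String))) :
    ∀ (sub : List (String × List (String × List String))),
    (∀ p ∈ sub, orig.lookup p.1 = some p.2) →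
    List.Forall₂ (fun k f => f = pvQual orig k) (sub.map Prod.fst)
      (sub.map (fun p =>
        PySem.Str.isIn "Peer" p.1 && !(p.2.any (fun q => q.1 == "#Name")))) := by
  intro sub
  induction sub with
  | nil => intro _; simp
  | cons p rest ih =>
    intro h
    simp only [List.map_cons, List.forall₂_cons]
    refine ⟨?_, ih (fun p' hp' => h p' (List.mem_cons_of_mem _ hp'))⟩
    have hl : orig.lookup p.1 = some p.2 := h p (by simp)
    simp [pvQual, hl]

-- main loop correspondence: A's interleaved counter loop over the remaining keys ks
-- equals B's index-driven pass, with the counter recovered as the prefix count of F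
theorem loop_eq (orig F : _) :
    ∀ (ks : List String) (d : List (String × List (String × List String))) (n : ℕ),
    ks.Nodup →
    (∀ k ∈ ks, d.lookup k = orig.lookup k) →
    List.Forall₂ (fun k f => f = pvQual orig k) ks (F.drop n) →
    (ks.foldl
      (fun (st : List (String × List (String × List String)) × Int) key =>
        if PySem.Str.isIn "Peer" key &&
           !(((st.1.lookup key).getD []).any (fun q => q.1 == "#Name")) then
          (pvSetName st.1 key ["User" ++ PySem.Int.toStr st.2], st.2 + 1)
        else st)
      (d, (F.take n).foldl (fun a b => a + (if b then (1 : Int) else 0)) 0)).1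
    = (PySem.List.enumerate ks (n : Int)).foldl
        (fun d pk =>
          if PySem.List.pyGetD F pk.1 false then
            pvSetName d pk.2
              ["User" ++ PySem.Int.toStr
                ((PySem.List.slice F none (some pk.1)).foldl
                  (fun a b => a + (if b then (1 : Int) else 0)) 0)]
          else d) d := by
  intro ks
  induction ks with
  | nil => intro d n _ _ _; simp [PySem.List.enumerate]
  | cons k ks ih =>
    intro d n hnd hagree hff
    have hdrop : F.drop n ≠ [] := by
      intro e; rw [e] at hff
      simpa using List.forall₂_nil_right_iff.mp hff
    obtain ⟨f, fs, hdf⟩ : ∃ f fs, F.drop n = f :: fs :=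
      List.exists_cons_of_ne_nil hdrop
    rw [hdf] at hff
    obtain ⟨hf, hfs⟩ := List.forall₂_cons.mp hff
    have hn : n < F.length := by
      by_contra hge
      rw [List.drop_eq_nil_of_le (le_of_not_gt hge)] at hdf; cases hdf
    have hFn : F[n] = f := by
      have h0 : (F.drop n)[0]? = some f := by rw [hdf]; rfl
      rw [List.getElem?_drop] at h0
      simpa [List.getElem?_eq_getElem hn] using h0
    have hdropsucc : F.drop (n + 1) = fs := by
      have : (F.drop n).tail = F.drop (n + 1) := by
        rw [← List.drop_drop]; simp
      rw [hdf] at this; simpa using this.symm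
    have htake : F.take (n + 1) = F.take n ++ [f] := by
      rw [List.take_add_one]
      simp [List.getElem?_eq_getElem hn, hFn]
    have hget : PySem.List.pyGetD F ((n : Int)) false = f := by
      rw [PySem.List.pyGetD_natCast]
      simp [List.getD, List.getElem?_eq_getElem hn, hFn]
    have hslice : PySem.List.slice F none (some ((n : Int))) = F.take n :=
      PySem.List.slice_to_natCast F n
    have hk : d.lookup k = orig.lookup k := hagree k (by simp)
    have hnd' : ks.Nodup := hnd.of_cons
    have hkmem : k ∉ ks := (List.nodup_cons.mp hnd).1
    have hagree' : ∀ step, ∀ k' ∈ ks,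
        (pvSetName d k step).lookup k' = orig.lookup k' := by
      intro step k' hk'
      have hne : k' ≠ k := fun e => hkmem (e ▸ hk')
      rw [lookup_pvSetName_ne d k k' _ hne]
      exact hagree k' (List.mem_cons_of_mem _ hk')
    rw [PySem.List.enumerate_cons, List.foldl_cons, List.foldl_cons]
    by_cases hq : pvQual orig k = true
    · have hcd : (PySem.Str.isIn "Peer" k &&
          !(((d.lookup k).getD []).any (fun q => q.1 == "#Name"))) = true := by
        unfold pvQual at hq; rw [hk]; exact hq
      rw [if_pos hcd, if_pos (by rw [hget, hf, hq])]
      have hsum : (F.take (n + 1)).foldl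
          (fun a b => a + (if b then (1 : Int) else 0)) 0
          = (F.take n).foldl (fun a b => a + (if b then (1 : Int) else 0)) 0 + 1 := by
        rw [htake, List.foldl_append, hf, hq]; simp
      have := ih (pvSetName d k
          ["User" ++ PySem.Int.toStr
            ((F.take n).foldl (fun a b => a + (if b then (1 : Int) else 0)) 0)])
        (n + 1) hnd' (hagree' _) (hdropsucc ▸ hfs)
      rw [hsum] at this
      push_cast at this
      simpa [hslice] using this
    · have hq' : pvQual orig k = false := by simpa using hq
      have hcd : ¬ (PySem.Str.isIn "Peer" k &&
          !(((d.lookup k).getD []).any (fun q => q.1 == "#Name"))) = true := by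
        unfold pvQual at hq'; rw [hk, hq']; simp
      rw [if_neg hcd, if_neg (by rw [hget, hf, hq']; simp)]
      have hsum : (F.take (n + 1)).foldl
          (fun a b => a + (if b then (1 : Int) else 0)) 0
          = (F.take n).foldl (fun a b => a + (if b then (1 : Int) else 0)) 0 := by
        rw [htake, List.foldl_append, hf, hq']; simp
      have := ih d (n + 1) hnd'
        (fun k' hk' => hagree k' (List.mem_cons_of_mem _ hk')) (hdropsucc ▸ hfs)
      rw [hsum] at this
      push_cast at this
      simpa using this

-- ===== VERDICT (by name: the statement is the Claim_ definition above) =====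
theorem randomNames_spec : Claim_equal_randomNames := by
  intro sections _ hpre
  unfold Spec_randomNames randomNames randomNames_alt
  have hff := flags_forall sections sections (lookup_self_of_nodup sections hpre)
  have := loop_eq sections
    (sections.map (fun p =>
      PySem.Str.isIn "Peer" p.1 && !(p.2.any (fun q => q.1 == "#Name"))))
    (sections.map Prod.fst) sections 0 hpre (fun _ _ => rfl) (by simpa using hff)
  simpa using this
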